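-- pv_equiv track=rewrite | github.com/QitaoXu/Lintcode | interviews/FUA/Python/mNumKtimes.py | findNumbersDiff
-- ===== SOURCE A (Python) =====
-- def findNumbersDiff(nums, m, k):
--
--     mod_to_lists = {}
--
--     for num in nums:
--
--         if (num % k) not in mod_to_lists:
--             mod_to_lists[num % k] = []
--
--         mod_to_lists[num % k].append(num)
--
--     for mod in mod_to_lists:
--         if len(mod_to_lists[mod]) == m:
--
--             return mod_to_lists[mod]
--
--     return []
-- ===== SOURCE B (Python) =====
-- def findNumbersDiff(nums, m, k):
--     # Dictionary-free repeated partition: peel off the residue class of the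
--     # first remaining element; if its size is m it is the answer (first-appearance
--     # order of residues is preserved), otherwise discard that whole class and repeat.
--     rest = nums
--     while rest:
--         r = rest[0] % k
--         group = [x for x in rest if x % k == r]
--         if len(group) == m:
--             return group
--         rest = [x for x in rest if x % k != r]
--     return []
-- ===== Notes on version B (the rewrite author's own statement) =====
-- stated objective: alternative
-- what changed: B uses no dictionary at all: it repeatedly partitions the remaining list on the first element's residue mod k, returns that class if it has size m, else drops the whole class and repeats; A builds a residue->list map in one pass and scans it.
import Mathlib
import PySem

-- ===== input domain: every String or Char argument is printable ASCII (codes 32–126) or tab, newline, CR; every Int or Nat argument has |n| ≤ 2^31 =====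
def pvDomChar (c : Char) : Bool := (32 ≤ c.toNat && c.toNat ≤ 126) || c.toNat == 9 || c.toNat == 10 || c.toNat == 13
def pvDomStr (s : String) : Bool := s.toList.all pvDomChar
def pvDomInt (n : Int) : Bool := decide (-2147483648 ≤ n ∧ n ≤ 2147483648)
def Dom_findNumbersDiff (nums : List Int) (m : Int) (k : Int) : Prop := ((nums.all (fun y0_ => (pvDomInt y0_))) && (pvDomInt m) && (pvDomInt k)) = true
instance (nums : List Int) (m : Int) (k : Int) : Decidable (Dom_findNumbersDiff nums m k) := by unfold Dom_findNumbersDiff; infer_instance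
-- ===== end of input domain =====

-- B drops A's residue->list dictionary entirely: it repeatedly partitions the remaining
-- list on the first element's residue mod k, returning that class when its size is m
-- (alternative algorithm, no map; same answers).

-- ===== PORT A =====
-- build mod_to_lists exactly as A does: insert an empty list when the key is new, then append
def findNumbersDiff (nums : List Int) (m : Int) (k : Int) : List Int :=
  let d := nums.foldl (fun d num =>
    let md := PySem.Int.mod num k
    let d := if d.contains md then d else d.insert md []
    d.modify md [] (fun l => l ++ [num])) PySem.Dict.empty
  -- 'for mod in mod_to_lists: if len(...) == m: return ...' = first item whose list has length m
  match d.items.find? (fun p => (p.2.length : Int) == m) with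
  | some p => p.2
  | none => []

-- ===== PORT B =====
-- the while loop of Source B: rest is the remaining list; head's class is tried, then discarded
def findNumbersDiffLoop (m k : Int) : List Int → List Int
  | [] => []
  | x :: t =>
    let r := PySem.Int.mod x k
    let group := (x :: t).filter (fun y => PySem.Int.mod y k == r)
    if (group.length : Int) == m then group
    else findNumbersDiffLoop m k ((x :: t).filter (fun y => !(PySem.Int.mod y k == r)))
termination_by s => s.length
decreasing_by
  simp only [List.filter_cons, BEq.rfl, Bool.not_true, List.length_cons]
  exact Nat.lt_succ_of_le (List.length_filter_le _ _)

def findNumbersDiff_alt (nums : List Int) (m : Int) (k : Int) : List Int :=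
  findNumbersDiffLoop m k nums

-- ===== PRECONDITION & SPEC =====
-- Pre_ excludes only k = 0 with nums ≠ [], where Python's '%' raises ZeroDivisionError (both A and B raise there).
def Pre_findNumbersDiff (nums : List Int) (m : Int) (k : Int) : Prop := k ≠ 0 ∨ nums = []
instance (nums : List Int) (m : Int) (k : Int) : Decidable (Pre_findNumbersDiff nums m k) := by unfold Pre_findNumbersDiff; infer_instance
def pvWitness_findNumbersDiff : List Int × Int × Int := ([1, 2, 3, 4, 6], 2, 3)
def Spec_findNumbersDiff (nums : List Int) (m : Int) (k : Int) (out : List Int) : Prop := out = findNumbersDiff_alt nums m k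
instance (nums : List Int) (m : Int) (k : Int) (out : List Int) : Decidable (Spec_findNumbersDiff nums m k out) := by unfold Spec_findNumbersDiff; infer_instance

-- ===== CLAIM (what is proved, stated in full; the proofs are below) =====
def Claim_equal_findNumbersDiff : Prop := ∀ (nums : List Int) (m : Int) (k : Int), Dom_findNumbersDiff nums m k → Pre_findNumbersDiff nums m k → Spec_findNumbersDiff nums m k (findNumbersDiff nums m k)

-- ===== LEMMAS AND PROOFS =====

-- A's 'insert-if-absent then append' step is exactly Dict.modify
theorem stepA_eq_modify (d : PySem.Dict Int (List Int)) (md : Int) (num : Int) :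
    (if d.contains md then d else d.insert md []).modify md [] (fun l => l ++ [num])
      = d.modify md [] (fun l => l ++ [num]) := by
  by_cases h : d.contains md = true
  · simp [h]
  · simp only [h, if_false, Bool.false_eq_true]
    simp only [PySem.Dict.modify, PySem.Dict.getD_insert_self,
      PySem.Dict.insert_insert_self,
      PySem.Dict.getD_of_not_contains d ([] : List Int) (by simpa using h)]

-- A's dict lookup, as a filter of nums
theorem dictA_getD (nums : List Int) (k c : Int) :
    ((nums.map (fun n => (PySem.Int.mod n k, n))).foldl
        (fun d p => d.modify p.1 [] (fun l => l ++ [p.2])) PySem.Dict.empty).getD c []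
      = nums.filter (fun n => PySem.Int.mod n k == c) := by
  rw [PySem.Dict.getD_foldl_modify_append]
  simp [List.filter_map, Function.comp_def]

-- find? depends on the predicate only on members
theorem find?_congr_mem {α : Type} {p q : α → Bool} :
    ∀ (l : List α), (∀ a ∈ l, p a = q a) → l.find? p = l.find? q := by
  intro l
  induction l with
  | nil => intro _; rfl
  | cons x t ih =>
    intro h
    have hx := h x (by simp)
    cases hq : q x with
    | true =>
      rw [List.find?_cons_of_pos (hx ▸ hq), List.find?_cons_of_pos hq]
    | false =>
      rw [List.find?_cons_of_neg (by simp [hx, hq]),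
        List.find?_cons_of_neg (by simp [hq]),
        ih (fun a ha => h a (by simp [ha]))]

-- set(xs) commutes with filtering the underlying list
theorem ofList_filter (p : Int → Bool) :
    ∀ (l : List Int), (PySem.Set.ofList l).filter p = PySem.Set.ofList (l.filter p) := by
  intro l
  induction l with
  | nil => rfl
  | cons x t ih =>
    rw [PySem.Set.ofList_cons, PySem.Set.discard]
    cases hx : p x with
    | true =>
      rw [List.filter_cons_of_pos hx, List.filter_cons_of_pos hx,
        PySem.Set.ofList_cons, PySem.Set.discard, ← ih,
        List.filter_filter, List.filter_filter]
      congr 1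
      exact List.filter_congr (fun a _ => by rw [Bool.and_comm])
    | false =>
      rw [List.filter_cons_of_neg (by simp [hx]),
        List.filter_cons_of_neg (by simp [hx]), ← ih,
        List.filter_filter]
      exact List.filter_congr (fun a _ => by
        cases hax : a == x with
        | true =>
          have : a = x := by simpa using hax
          simp [this, hx]
        | false => simp)

-- characterisation of B's loop: first residue (in first-appearance order) whose class has size m
theorem findNumbersDiffLoop_spec (m k : Int) :
    ∀ (s : List Int), findNumbersDiffLoop m k s =
      match (PySem.Set.ofList (s.map (fun n => PySem.Int.mod n k))).find?
          (fun c => ((s.filter (fun n => PySem.Int.mod n k == c)).length : Int) == m) with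
      | some c => s.filter (fun n => PySem.Int.mod n k == c)
      | none => [] := by
  intro s
  induction hl : s.length using Nat.strong_induction_on generalizing s with
  | _ L ih =>
  cases s with
  | nil => simp [findNumbersDiffLoop]
  | cons x t =>
    rw [findNumbersDiffLoop]
    simp only [List.map_cons, PySem.Set.ofList_cons, PySem.Set.discard, List.find?_cons]
    cases hP : (((((x :: t).filter (fun n => PySem.Int.mod n k == PySem.Int.mod x k)).length : Int)) == m) with
    | true => simp only [if_true]
    | false =>
      simp only [Bool.false_eq_true, if_false]
      -- the recursive argument drops the head (its residue equals r)
      have hrest : (x :: t).filter (fun y => !(PySem.Int.mod y k == PySem.Int.mod x k))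
          = t.filter (fun y => !(PySem.Int.mod y k == PySem.Int.mod x k)) := by
        rw [List.filter_cons_of_neg (by simp)]
      rw [hrest]
      have hlen : (t.filter (fun y => !(PySem.Int.mod y k == PySem.Int.mod x k))).length < L := by
        subst hl
        exact Nat.lt_succ_of_le (List.length_filter_le _ _)
      rw [ih _ hlen _ rfl]
      -- identify the residue set of the remainder with the discarded set
      have hset : PySem.Set.ofList ((t.filter (fun y => !(PySem.Int.mod y k == PySem.Int.mod x k))).map (fun n => PySem.Int.mod n k))
          = (PySem.Set.ofList (t.map (fun n => PySem.Int.mod n k))).filter (fun y => !(y == PySem.Int.mod x k)) := by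
        rw [ofList_filter, List.filter_map]
        simp only [Function.comp_def]
      rw [hset]
      -- on that set every residue c ≠ r, where class filters over remainder and over x :: t agree
      have hkey : ∀ c ∈ (PySem.Set.ofList (t.map (fun n => PySem.Int.mod n k))).filter (fun y => !(y == PySem.Int.mod x k)),
          ((t.filter (fun y => !(PySem.Int.mod y k == PySem.Int.mod x k))).filter (fun n => PySem.Int.mod n k == c))
            = (x :: t).filter (fun n => PySem.Int.mod n k == c) := by
        intro c hc
        have hcr : (c == PySem.Int.mod x k) = false := by
          have := (List.mem_filter.mp hc).2
          simpa using this
        rw [List.filter_cons_of_neg (by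
          cases hxc : (PySem.Int.mod x k == c) with
          | true =>
            exfalso
            have : PySem.Int.mod x k = c := by simpa using hxc
            simp [← this] at hcr
          | false => simp), List.filter_filter]
        exact List.filter_congr (fun a _ => by
          cases hac : (PySem.Int.mod a k == c) with
          | true =>
            have : PySem.Int.mod a k = c := by simpa using hac
            simp [this, hcr]
          | false => simp)
      rw [find?_congr_mem _ (fun c hc => by rw [hkey c hc])]
      cases hf : ((PySem.Set.ofList (t.map (fun n => PySem.Int.mod n k))).filter (fun y => !(y == PySem.Int.mod x k))).find?
          (fun c => (((x :: t).filter (fun n => PySem.Int.mod n k == c)).length : Int) == m) with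
      | none => simp
      | some c =>
        have hc := List.mem_of_find?_eq_some hf
        simp only
        exact hkey c hc

-- ===== VERDICT (by name: the statement is the Claim_ definition above) =====
theorem findNumbersDiff_spec : Claim_equal_findNumbersDiff := by
  intro nums m k _ _
  unfold Spec_findNumbersDiff
  simp only [findNumbersDiff, findNumbersDiff_alt]
  rw [findNumbersDiffLoop_spec]
  -- normalise A's fold step to a plain modify
  rw [PySem.List.foldl_congr_mem nums _
      (fun d num => d.modify (PySem.Int.mod num k) [] (fun l => l ++ [num]))
      PySem.Dict.empty (fun acc x _ => stepA_eq_modify acc (PySem.Int.mod x k) x)]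
  -- keys of A's dict: the distinct mods, in first-appearance order
  have hnodup : (List.foldl (fun d num => d.modify (PySem.Int.mod num k) [] (fun l => l ++ [num])) PySem.Dict.empty nums).keys.Nodup :=
    PySem.Dict.nodup_keys_foldl_modify_key nums (fun num => PySem.Int.mod num k) []
      (fun _ num l => l ++ [num]) PySem.Dict.empty (by simp [PySem.Dict.keys_empty])
  have hkeys : (List.foldl (fun d num => d.modify (PySem.Int.mod num k) [] (fun l => l ++ [num])) PySem.Dict.empty nums).keys
      = PySem.Set.ofList (nums.map (fun n => PySem.Int.mod n k)) := by
    rw [PySem.Dict.keys_foldl_modify_key nums (fun num => PySem.Int.mod num k) []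
      (fun _ num l => l ++ [num]) PySem.Dict.empty]
    simp [PySem.Dict.keys_empty, PySem.Set.update_nil_left]
  -- values of A's dict: the groups, as filters of nums
  have hgetD : ∀ c : Int,
      (List.foldl (fun d num => d.modify (PySem.Int.mod num k) [] (fun l => l ++ [num])) PySem.Dict.empty nums).getD c []
        = nums.filter (fun n => PySem.Int.mod n k == c) := by
    intro c
    rw [← dictA_getD nums k c, List.foldl_map]
  have hitems := PySem.Dict.items_eq_map_keys _ hnodup ([] : List Int)
  rw [hitems, hkeys]
  simp only [hgetD]
  rw [List.find?_map]
  simp only [Function.comp_def]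
  cases hf : (PySem.Set.ofList (nums.map (fun n => PySem.Int.mod n k))).find?
      (fun c => (((nums.filter (fun n => PySem.Int.mod n k == c)).length : Int)) == m) with
  | none => simp
  | some c => simp
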